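-- pv_equiv track=rewrite | github.com/casamongo/jobsearch | orchestrator.py | merge_and_dedup
-- ===== SOURCE A (Python) =====
-- def make_role_key(role: dict) -> str:
--     """Create a dedup key from company + title (normalized)."""
--     company = role.get("company", "").strip().lower()
--     title = role.get("title", "").strip().lower()
--     return f"{company}|{title}"
--
-- def merge_and_dedup(agent2_roles: list, agent3_roles: list) -> list:
--     """Merge roles from Agent 2 and Agent 3, deduplicating by company+title."""
--     seen_keys = {}
--     merged = []
--
--     for role in agent2_roles + agent3_roles:
--         key = make_role_key(role)
--         if key in seen_keys:
--             # Merge sources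
--             existing = merged[seen_keys[key]]
--             existing_source = existing.get("source", "")
--             new_source = role.get("source", "")
--             if new_source and new_source not in existing_source:
--                 existing["source"] = f"{existing_source}, {new_source}"
--             # Prefer non-empty fields
--             for field in ["url", "compensation", "datePosted", "location"]:
--                 if not existing.get(field) or existing[field] in ("Not disclosed", "Unknown", ""):
--                     if role.get(field) and role[field] not in ("Not disclosed", "Unknown", ""):
--                         existing[field] = role[field]
--         else:
--             seen_keys[key] = len(merged)
--             merged.append(role)
--
--     return merged
-- ===== SOURCE B (Python) =====
-- def make_role_key(role: dict) -> str:
--     """Create a dedup key from company + title (normalized)."""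
--     company = role.get("company", "").strip().lower()
--     title = role.get("title", "").strip().lower()
--     return f"{company}|{title}"
--
-- def _absorb(base: dict, other: dict) -> None:
--     """Fold one duplicate role into the first-seen role (mutates base in place)."""
--     base_source = base.get("source", "")
--     extra_source = other.get("source", "")
--     if extra_source and extra_source not in base_source:
--         base["source"] = f"{base_source}, {extra_source}"
--     for field in ["url", "compensation", "datePosted", "location"]:
--         if not base.get(field) or base[field] in ("Not disclosed", "Unknown", ""):
--             if other.get(field) and other[field] not in ("Not disclosed", "Unknown", ""):
--                 base[field] = other[field]
--
-- def _merge_group(group: list) -> dict: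
--     base = group[0]
--     for other in group[1:]:
--         _absorb(base, other)
--     return base
--
-- def merge_and_dedup(agent2_roles: list, agent3_roles: list) -> list:
--     """Merge roles from Agent 2 and Agent 3, deduplicating by company+title."""
--     groups = {}
--     for role in agent2_roles + agent3_roles:
--         key = make_role_key(role)
--         groups[key] = groups.get(key, []) + [role]
--     return [_merge_group(group) for group in groups.values()]
-- ===== Notes on version B (the rewrite author's own statement) =====
-- stated objective: alternative
-- what changed: Replaces A's single pass that keeps a key->index dict plus a merged list and updates merged[index] in place by a two-pass decomposition: first group all roles by key into an insertion-ordered dict of lists, then fold each group into its first role with the same absorb rules.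
import Mathlib
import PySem

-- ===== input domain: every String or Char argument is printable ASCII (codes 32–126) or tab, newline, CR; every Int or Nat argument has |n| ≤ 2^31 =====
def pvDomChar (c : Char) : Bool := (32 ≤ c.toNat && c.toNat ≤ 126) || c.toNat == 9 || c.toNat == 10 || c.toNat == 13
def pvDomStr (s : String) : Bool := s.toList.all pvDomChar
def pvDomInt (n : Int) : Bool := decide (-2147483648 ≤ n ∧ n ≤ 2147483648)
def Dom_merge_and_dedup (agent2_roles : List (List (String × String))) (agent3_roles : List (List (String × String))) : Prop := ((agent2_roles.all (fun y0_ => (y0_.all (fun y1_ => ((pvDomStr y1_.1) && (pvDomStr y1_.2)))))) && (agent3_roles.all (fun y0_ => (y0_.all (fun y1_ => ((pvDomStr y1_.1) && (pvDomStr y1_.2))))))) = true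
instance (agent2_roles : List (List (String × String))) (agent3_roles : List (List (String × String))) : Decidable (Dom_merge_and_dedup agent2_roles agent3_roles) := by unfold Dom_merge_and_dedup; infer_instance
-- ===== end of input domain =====

-- B replaces A's single pass (index dict + merged list, update-by-stored-index) by a two-pass
-- decomposition: group the roles by key into an insertion-ordered dict of lists, then fold each
-- group into its first role (alternative decomposition; in Python both A and B mutate the
-- first-seen role dicts in place identically — the equivalence proved here is about the return value).

-- ===== PORT A =====
-- role.get("company", "").strip().lower() + "|" + …  (shared helper, as in the Python module)
def make_role_key (role : List (String × String)) : String :=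
  let company := PySem.Str.lower (PySem.Str.strip ((PySem.Dict.mk role).getD "company" ""))
  let title := PySem.Str.lower (PySem.Str.strip ((PySem.Dict.mk role).getD "title" ""))
  company ++ "|" ++ title

def merge_and_dedup (agent2_roles : List (List (String × String))) (agent3_roles : List (List (String × String))) : List (List (String × String)) :=
  -- state = (seen_keys, merged); seen_keys stores former lengths of merged, hence Nat values
  let st := (agent2_roles ++ agent3_roles).foldl
    (fun (st : PySem.Dict String Nat × List (List (String × String))) role =>
      let key := make_role_key role
      match st.1.get? key with
      | some i =>
        -- merged[seen_keys[key]]: the stored index is always in range, the none branch is unreachable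
        match st.2[i]? with
        | some existing =>
          let existingD := PySem.Dict.mk existing
          let existing_source := existingD.getD "source" ""
          let new_source := (PySem.Dict.mk role).getD "source" ""
          let existingD :=
            if new_source != "" && !(PySem.Str.isIn new_source existing_source) then
              existingD.insert "source" (existing_source ++ ", " ++ new_source)
            else existingD
          let existingD := ["url", "compensation", "datePosted", "location"].foldl
            (fun ex field =>
              let bad := match ex.get? field with
                | none => true
                | some v => v == "" || v == "Not disclosed" || v == "Unknown"
              match (PySem.Dict.mk role).get? field with
              | some v =>
                if bad && (v != "" && !(v == "Not disclosed" || v == "Unknown" || v == "")) then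
                  ex.insert field v
                else ex
              | none => ex) existingD
          (st.1, st.2.set i existingD.items)
        | none => st
      | none => (st.1.insert key st.2.length, st.2 ++ [role]))
    (PySem.Dict.empty, [])
  st.2

-- ===== PORT B =====
-- _absorb(base, other): fold one duplicate role into the first-seen role
def pvAbsorb (base : List (String × String)) (other : List (String × String)) : List (String × String) :=
  let baseD := PySem.Dict.mk base
  let base_source := baseD.getD "source" ""
  let extra_source := (PySem.Dict.mk other).getD "source" ""
  let baseD :=
    if extra_source != "" && !(PySem.Str.isIn extra_source base_source) then
      baseD.insert "source" (base_source ++ ", " ++ extra_source)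
    else baseD
  let baseD := ["url", "compensation", "datePosted", "location"].foldl
    (fun ex field =>
      let bad := match ex.get? field with
        | none => true
        | some v => v == "" || v == "Not disclosed" || v == "Unknown"
      match (PySem.Dict.mk other).get? field with
      | some v =>
        if bad && (v != "" && !(v == "Not disclosed" || v == "Unknown" || v == "")) then
          ex.insert field v
        else ex
      | none => ex) baseD
  baseD.items

-- _merge_group(group): base = group[0]; fold the rest in (groups are never empty, so [] is unreachable)
def pvMergeGroup (group : List (List (String × String))) : List (String × String) :=
  match group with
  | [] => []
  | base :: rest => rest.foldl pvAbsorb base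

def merge_and_dedup_alt (agent2_roles : List (List (String × String))) (agent3_roles : List (List (String × String))) : List (List (String × String)) :=
  let groups := (agent2_roles ++ agent3_roles).foldl
    (fun (g : PySem.Dict String (List (List (String × String)))) role =>
      let key := make_role_key role
      g.insert key (g.getD key [] ++ [role]))
    PySem.Dict.empty
  groups.values.map pvMergeGroup

-- ===== PRECONDITION & SPEC =====
def Spec_merge_and_dedup (agent2_roles : List (List (String × String))) (agent3_roles : List (List (String × String))) (out : List (List (String × String))) : Prop := out = merge_and_dedup_alt agent2_roles agent3_roles
instance (agent2_roles : List (List (String × String))) (agent3_roles : List (List (String × String))) (out : List (List (String × String))) : Decidable (Spec_merge_and_dedup agent2_roles agent3_roles out) := by unfold Spec_merge_and_dedup; infer_instance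

-- ===== CLAIM (what is proved, stated in full; the proofs are below) =====
def Claim_equal_merge_and_dedup : Prop := ∀ (agent2_roles : List (List (String × String))) (agent3_roles : List (List (String × String))), Dom_merge_and_dedup agent2_roles agent3_roles → Spec_merge_and_dedup agent2_roles agent3_roles (merge_and_dedup agent2_roles agent3_roles)

-- ===== LEMMAS AND PROOFS =====

-- A's loop body, with the inline merge block named (definitionally equal to the body in merge_and_dedup)
def pvAStep (st : PySem.Dict String Nat × List (List (String × String))) (role : List (String × String)) : PySem.Dict String Nat × List (List (String × String)) :=
  match st.1.get? (make_role_key role) with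
  | some i =>
    match st.2[i]? with
    | some existing => (st.1, st.2.set i (pvAbsorb existing role))
    | none => st
  | none => (st.1.insert (make_role_key role) st.2.length, st.2 ++ [role])

-- B's grouping loop body
def pvGStep (g : PySem.Dict String (List (List (String × String)))) (role : List (String × String)) : PySem.Dict String (List (List (String × String))) :=
  g.insert (make_role_key role) (g.getD (make_role_key role) [] ++ [role])

lemma pvA_eq (a2 a3 : List (List (String × String))) :
    merge_and_dedup a2 a3 = ((a2 ++ a3).foldl pvAStep (PySem.Dict.empty, [])).2 := rfl

lemma pvB_eq (a2 a3 : List (List (String × String))) :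
    merge_and_dedup_alt a2 a3 = ((a2 ++ a3).foldl pvGStep PySem.Dict.empty).values.map pvMergeGroup := rfl

lemma pvMergeGroup_append (g : List (List (String × String))) (r : List (String × String)) (h : g ≠ []) :
    pvMergeGroup (g ++ [r]) = pvAbsorb (pvMergeGroup g) r := by
  cases g with
  | nil => exact absurd rfl h
  | cons b t => simp [pvMergeGroup, List.foldl_append]

-- rewriting every pair whose key is k, when keys are nodup, is a pointwise set at k's position
lemma pvMapOverwrite {ν : Type} (l : List (String × ν)) (k : String) (w : ν)
    (hn : (l.map Prod.fst).Nodup) (i : Nat) (hi : i < l.length) (hk : (l[i]).1 = k) :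
    l.map (fun p => if p.1 == k then (k, w) else p) = l.set i (k, w) := by
  induction l generalizing i with
  | nil => simp at hi
  | cons a t ih =>
    simp only [List.map_cons, List.nodup_cons] at hn
    cases i with
    | zero =>
      simp only [List.getElem_cons_zero] at hk
      have hta : ∀ p ∈ t, (if p.1 == k then (k, w) else p) = p := by
        intro p hp
        have hne : p.1 ≠ k := by
          intro he
          apply hn.1
          rw [hk, ← he]
          exact List.mem_map_of_mem hp
        simp [hne]
      simp only [List.map_cons, hk, beq_self_eq_true, if_pos, List.set_cons_zero]
      rw [List.map_congr_left hta, List.map_id']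
    | succ j =>
      simp only [List.getElem_cons_succ] at hk
      have hj : j < t.length := by simpa using hi
      have ha : a.1 ≠ k := by
        intro he
        exact hn.1 (by rw [he, ← hk]; exact List.mem_map_of_mem (List.getElem_mem hj))
      simp only [List.map_cons, List.set_cons_succ]
      rw [if_neg (by simpa using ha)]
      exact congrArg _ (ih hn.2 j hj hk)

-- the simulation invariant: A's (seen_keys, merged) against B's groups dict
def pvInv (st : PySem.Dict String Nat × List (List (String × String)))
    (g : PySem.Dict String (List (List (String × String)))) : Prop :=
  st.2 = g.items.map (fun p => pvMergeGroup p.2) ∧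
  st.1.items = (g.items.map Prod.fst).zipIdx ∧
  (g.items.map Prod.fst).Nodup ∧
  ∀ p ∈ g.items, p.2 ≠ []

lemma pvInv_init : pvInv (PySem.Dict.empty, []) PySem.Dict.empty := by
  refine ⟨rfl, rfl, by simp [PySem.Dict.empty], by simp [PySem.Dict.empty]⟩

lemma pvInv_step (st : PySem.Dict String Nat × List (List (String × String)))
    (g : PySem.Dict String (List (List (String × String)))) (r : List (String × String))
    (h : pvInv st g) : pvInv (pvAStep st r) (pvGStep g r) := by
  obtain ⟨h1, h2, h3, h4⟩ := h
  have hkeysA : st.1.keys = g.items.map Prod.fst := by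
    show st.1.items.map Prod.fst = _
    rw [h2]; exact List.zipIdx_map_fst 0 _
  have hkeysG : g.keys = g.items.map Prod.fst := rfl
  have hlen : st.2.length = g.items.length := by rw [h1]; simp
  by_cases hmem : make_role_key r ∈ g.items.map Prod.fst
  · -- key already seen: overwrite at the stored index / extend the group in place
    obtain ⟨i, hi, hik⟩ := List.mem_iff_getElem.mp hmem
    have hi' : i < g.items.length := by simpa using hi
    have hgi : (g.items[i]'hi').1 = make_role_key r := by simpa using hik
    have hnodA : st.1.keys.Nodup := by rw [hkeysA]; exact h3
    have hget : st.1.get? (make_role_key r) = some i := by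
      rw [PySem.Dict.get?_eq_some_iff_mem_items _ _ _ hnodA, h2]
      apply List.mem_zipIdx_iff_getElem?.mpr
      show (List.map Prod.fst g.items)[i]? = some (make_role_key r)
      rw [List.getElem?_eq_getElem hi]
      exact congrArg some hik
    have hsome : st.2[i]? = some (pvMergeGroup (g.items[i]'hi').2) := by
      rw [h1]
      rw [List.getElem?_map, List.getElem?_eq_getElem hi']
      rfl
    have hcont : g.contains (make_role_key r) = true := by
      rw [PySem.Dict.contains_iff_mem_keys _ _]; exact hkeysG ▸ hmem
    have hmemitems : (make_role_key r, (g.items[i]'hi').2) ∈ g.items := by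
      have := List.getElem_mem hi'
      rwa [show g.items[i]'hi' = (make_role_key r, (g.items[i]'hi').2) from Prod.ext hgi rfl] at this
    have hgetD : g.getD (make_role_key r) [] = (g.items[i]'hi').2 :=
      PySem.Dict.getD_of_mem_items _ hmemitems (hkeysG ▸ h3) []
    have hitems : (pvGStep g r).items = g.items.set i (make_role_key r, (g.items[i]'hi').2 ++ [r]) := by
      show ((g.insert (make_role_key r) (g.getD (make_role_key r) [] ++ [r]))).items = _
      rw [PySem.Dict.items_insert_of_contains _ _ hcont, hgetD]
      exact pvMapOverwrite _ _ _ h3 i hi' hgi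
    have hfstset : (g.items.set i (make_role_key r, (g.items[i]'hi').2 ++ [r])).map Prod.fst
        = g.items.map Prod.fst := by
      rw [List.map_set]
      show (List.map Prod.fst g.items).set i (make_role_key r) = _
      rw [← hik]
      exact List.set_getElem_self hi
    simp only [pvAStep, hget, hsome]
    refine ⟨?_, ?_, ?_, ?_⟩
    · rw [hitems, List.map_set, h1]
      have hne : (g.items[i]'hi').2 ≠ [] := h4 _ (List.getElem_mem hi')
      rw [pvMergeGroup_append _ _ hne]
    · rw [h2, hitems, hfstset]
    · rw [hitems, hfstset]; exact h3
    · intro p hp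
      rw [hitems] at hp
      rcases List.mem_or_eq_of_mem_set hp with hp' | hp'
      · exact h4 _ hp'
      · rw [hp']; simp
  · -- fresh key: append a new entry / start a new singleton group
    have hnotA : make_role_key r ∉ st.1.keys := by rw [hkeysA]; exact hmem
    have hget : st.1.get? (make_role_key r) = none :=
      (PySem.Dict.get?_eq_none_iff_not_mem_keys _ _).mpr hnotA
    have hcontG : g.contains (make_role_key r) = false := by
      by_contra hne
      exact hmem (hkeysG ▸ ((PySem.Dict.contains_iff_mem_keys _ _).mp (by simpa using hne)))
    have hcontA : st.1.contains (make_role_key r) = false := by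
      by_contra hne
      exact hnotA ((PySem.Dict.contains_iff_mem_keys _ _).mp (by simpa using hne))
    have hitems : (pvGStep g r).items = g.items ++ [(make_role_key r, [r])] := by
      show ((g.insert (make_role_key r) (g.getD (make_role_key r) [] ++ [r]))).items = _
      rw [PySem.Dict.items_insert_of_not_contains _ _ hcontG,
        PySem.Dict.getD_of_not_contains _ _ hcontG]
      rfl
    simp only [pvAStep, hget]
    refine ⟨?_, ?_, ?_, ?_⟩
    · rw [hitems, List.map_append, h1]; rfl
    · rw [PySem.Dict.items_insert_of_not_contains _ _ hcontA, h2, hitems]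
      simp [List.zipIdx_append, hlen]
    · rw [hitems, List.map_append]
      exact List.Nodup.append h3 (List.nodup_singleton _) (List.disjoint_singleton.mpr hmem)
    · intro p hp
      rw [hitems] at hp
      rcases List.mem_append.mp hp with hp' | hp'
      · exact h4 _ hp'
      · simp at hp'; rw [hp']; simp
lemma pvInv_foldl (l : List (List (String × String)))
    (st : PySem.Dict String Nat × List (List (String × String)))
    (g : PySem.Dict String (List (List (String × String))))
    (h : pvInv st g) : pvInv (l.foldl pvAStep st) (l.foldl pvGStep g) := by
  induction l generalizing st g with
  | nil => exact h
  | cons r t ih => exact ih _ _ (pvInv_step _ _ _ h)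

-- ===== VERDICT (by name: the statement is the Claim_ definition above) =====
theorem merge_and_dedup_spec : Claim_equal_merge_and_dedup := by
  intro a2 a3 _
  show merge_and_dedup a2 a3 = merge_and_dedup_alt a2 a3
  rw [pvA_eq, pvB_eq]
  have h := pvInv_foldl (a2 ++ a3) (PySem.Dict.empty, []) PySem.Dict.empty pvInv_init
  rw [h.1]
  show _ = (((a2 ++ a3).foldl pvGStep PySem.Dict.empty).items.map Prod.snd).map pvMergeGroup
  rw [List.map_map]
  rfl
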